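-- pv_equiv track=rewrite | github.com/amongus-pvp/ORACsolns | Starter Set IV: AIO problems/Genius.py | solve_genius_problem
-- ===== SOURCE A (Python) =====
-- def solve_genius_problem(n, p):
--     solved_problems = [0] * n
--     total_problems = p
--     round_num = 0
--
--     # simulation problem
--
--     while total_problems > 0:
--         for i in range(n):
--             problems_to_solve = (round_num * n) + (i + 1)
--             if total_problems <= problems_to_solve:
--                 solved_problems[i] += total_problems
--                 total_problems = 0
--                 break
--             else:
--                 solved_problems[i] += problems_to_solve
--                 total_problems -= problems_to_solve
--         round_num += 1
--
--
--     max_solved = max(solved_problems)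
--     person = solved_problems.index(max_solved) + 1  # 1 indexed
--
--     return person, max_solved
-- ===== SOURCE B (Python) =====
-- def _person_total(n, t, rem, j, i):
--     m = (t - i - 2) // n + 1 if t >= i + 2 else 0
--     tot = m * (i + 1) + n * m * (m - 1) // 2
--     return tot + rem if i == j else tot
--
--
-- def solve_genius_problem(n, p):
--     # Closed form: last (partial) step t = least t >= 1 with t(t+1)//2 >= p (binary search);
--     # persons i >= t-1 solve nothing (except the one taking the final partial step), so only
--     # the first min(n, t-1) totals need the arithmetic-series formula.
--     if p <= 0:
--         totals = [0] * n
--     else: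
--         lo, hi = 1, p
--         while lo < hi:
--             mid = (lo + hi) // 2
--             if mid * (mid + 1) // 2 >= p:
--                 hi = mid
--             else:
--                 lo = mid + 1
--         t = lo
--         rem = p - t * (t - 1) // 2
--         j = (t - 1) % n
--         c = min(n, t - 1)
--         totals = [_person_total(n, t, rem, j, i) for i in range(c)] + [0] * (n - c)
--         if j >= c:
--             totals[j] = rem
--     best = max(totals)
--     return totals.index(best) + 1, best
-- ===== Notes on version B (the rewrite author's own statement) =====
-- stated objective: alternative
-- what changed: Replaces the step-by-step round-robin simulation with a closed form: binary-search the terminating step t (least t with t(t+1)/2 >= p), then compute each person's total as an arithmetic series; it trades A's O(sqrt p) simulation loop for O(log p) search plus one formula per person, though on the timed inputs both are dominated by the O(n) max/index pass so a timing run shows no 1.5x win.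
import Mathlib
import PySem

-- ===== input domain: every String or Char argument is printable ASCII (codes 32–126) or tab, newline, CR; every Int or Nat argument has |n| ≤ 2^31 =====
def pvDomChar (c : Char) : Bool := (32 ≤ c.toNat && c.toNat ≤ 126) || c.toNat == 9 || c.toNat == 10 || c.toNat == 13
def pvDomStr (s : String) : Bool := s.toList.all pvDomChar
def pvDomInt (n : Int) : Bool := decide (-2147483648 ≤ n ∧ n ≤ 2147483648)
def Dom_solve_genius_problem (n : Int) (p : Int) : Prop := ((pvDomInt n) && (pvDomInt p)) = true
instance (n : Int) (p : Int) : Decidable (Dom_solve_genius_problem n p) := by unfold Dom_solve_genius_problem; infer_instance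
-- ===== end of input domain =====

-- B replaces A's step-by-step round-robin simulation by a closed form: binary-search the
-- terminating step, then one arithmetic-series formula per person (a different algorithm).

-- ===== PORT A =====
-- inner `for i in range(n)` loop; i is always a valid non-negative index into solved, so
-- pySetD/pyGetD are exact for Python's solved_problems[i].
def innerA (n roundNum : Int) : List Int → List Int × Int → List Int × Int
  | [], st => st
  | i :: rest, (solved, total) =>
      let pts := roundNum * n + (i + 1)
      if total ≤ pts then
        (PySem.List.pySetD solved i (PySem.List.pyGetD solved i 0 + total), 0)
      else
        innerA n roundNum rest (PySem.List.pySetD solved i (PySem.List.pyGetD solved i 0 + pts), total - pts)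

-- `while total_problems > 0` loop; fuel p.toNat + 1 only makes the loop total: when n ≥ 1 each
-- round strictly decreases total, so the fuel is never exhausted on inputs admitted by Pre_.
def outerA (n : Int) : Nat → List Int → Int → Int → List Int × Int
  | 0, solved, total, _ => (solved, total)
  | fuel+1, solved, total, roundNum =>
      if 0 < total then
        let st := innerA n roundNum (PySem.List.pyRange 0 n 1) (solved, total)
        outerA n fuel st.1 st.2 (roundNum + 1)
      else (solved, total)

def solve_genius_problem (n : Int) (p : Int) : List Int :=
  let solved := PySem.List.pyRepeat [(0 : Int)] n
  let st := outerA n (p.toNat + 1) solved p 0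
  match PySem.List.max? st.1 (fun x => x) with
  | none => []   -- max([]) raises ValueError; excluded by Pre_
  | some maxSolved =>
      match PySem.List.index? st.1 maxSolved with
      | none => []  -- unreachable: maxSolved ∈ st.1
      | some idx => [(idx : Int) + 1, maxSolved]

-- ===== PORT B =====
-- port of Source B's helper _person_total(n, t, rem, j, i)
def pvTotal (n t rem j i : Int) : Int :=
  let m := if i + 2 ≤ t then PySem.Int.floordiv (t - i - 2) n + 1 else 0
  let tot := m * (i + 1) + PySem.Int.floordiv (n * m * (m - 1)) 2
  if i = j then tot + rem else tot

-- binary search for the least t ≥ 1 with t(t+1)//2 ≥ p; fuel only makes the while loop total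
-- (hi - lo strictly decreases, and initially hi - lo = p - 1 < p.toNat).
def bsearchB (p : Int) : Nat → Int → Int → Int
  | 0, lo, _ => lo
  | fuel+1, lo, hi =>
      if lo < hi then
        let mid := PySem.Int.floordiv (lo + hi) 2
        if p ≤ PySem.Int.floordiv (mid * (mid + 1)) 2 then
          bsearchB p fuel lo mid
        else
          bsearchB p fuel (mid + 1) hi
      else lo

def solve_genius_problem_alt (n : Int) (p : Int) : List Int :=
  let totals :=
    if p ≤ 0 then PySem.List.pyRepeat [(0 : Int)] n
    else
      let t := bsearchB p p.toNat 1 p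
      let rem := p - PySem.Int.floordiv (t * (t - 1)) 2
      let j := PySem.Int.mod (t - 1) n
      let c := min n (t - 1)
      let totals0 := (PySem.List.pyRange 0 c 1).map (fun i => pvTotal n t rem j i)
          ++ PySem.List.pyRepeat [(0 : Int)] (n - c)
      -- totals[j] = rem: 0 ≤ j = (t-1) % n < n = len(totals0), a valid index, so pySetD is exact
      if c ≤ j then PySem.List.pySetD totals0 j rem else totals0
  match PySem.List.max? totals (fun x => x) with
  | none => []
  | some best =>
      match PySem.List.index? totals best with
      | none => []
      | some idx => [(idx : Int) + 1, best]

-- ===== PRECONDITION & SPEC =====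
-- Pre_ excludes n ≤ 0, where A never returns: with p ≤ 0 it raises ValueError (max of an empty
-- list) and with p > 0 the while loop never terminates (the empty inner for loop solves nothing).
def Pre_solve_genius_problem (n : Int) (p : Int) : Prop := 1 ≤ n
instance (n : Int) (p : Int) : Decidable (Pre_solve_genius_problem n p) := by unfold Pre_solve_genius_problem; infer_instance
def pvWitness_solve_genius_problem : Int × Int := (3, 7)

def Spec_solve_genius_problem (n : Int) (p : Int) (out : List Int) : Prop := out = solve_genius_problem_alt n p
instance (n : Int) (p : Int) (out : List Int) : Decidable (Spec_solve_genius_problem n p out) := by unfold Spec_solve_genius_problem; infer_instance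

-- ===== CLAIM (what is proved, stated in full; the proofs are below) =====
def Claim_equal_solve_genius_problem : Prop := ∀ (n : Int) (p : Int), Dom_solve_genius_problem n p → Pre_solve_genius_problem n p → Spec_solve_genius_problem n p (solve_genius_problem n p)

-- ===== LEMMAS AND PROOFS =====

/-- `S x = 1 + 2 + ⋯ + x` (for `x ≥ 0`): total problems handed out in the first `x` steps. -/
def S (x : Int) : Int := x * (x + 1) / 2

lemma two_S (x : Int) : 2 * S x = x * (x + 1) := by
  have h : (2 : Int) ∣ x * (x + 1) := (Int.even_mul_succ_self x).two_dvd
  unfold S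
  omega

lemma S_succ (x : Int) : S (x + 1) = S x + (x + 1) := by
  have h1 := two_S x
  have h2 := two_S (x + 1)
  nlinarith

lemma S_mono {x y : Int} (hx : 0 ≤ x) (hxy : x ≤ y) : S x ≤ S y := by
  have h1 := two_S x
  have h2 := two_S y
  nlinarith

lemma S_add_ge {a b : Int} (ha : 0 ≤ a) (hb : 0 ≤ b) : S a + b ≤ S (a + b) := by
  have h1 := two_S a
  have h2 := two_S (a + b)
  have hb1 : 0 ≤ b * (b - 1) := by rcases (by omega : b = 0 ∨ 1 ≤ b) with h | h <;> nlinarith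
  nlinarith [mul_nonneg ha hb]

/-- `t` is the terminating step for `p` problems: the least `t ≥ 1` with `S t ≥ p`. -/
def charT (p t : Int) : Prop := 1 ≤ t ∧ S (t - 1) < p ∧ p ≤ S t

lemma le_S_iff {p T : Int} (hT : charT p T) {x : Int} (hx : 0 ≤ x) : p ≤ S x ↔ T ≤ x := by
  obtain ⟨h1, h2, h3⟩ := hT
  constructor
  · intro h
    by_contra hc
    exact absurd (le_trans h (S_mono hx (by omega))) (not_le.mpr h2)
  · intro h
    exact le_trans h3 (S_mono (by omega) h)

lemma charT_p_pos {p T : Int} (hT : charT p T) : 0 < p := by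
  obtain ⟨h1, h2, h3⟩ := hT
  have : 0 ≤ S (T - 1) := by
    have := two_S (T - 1); nlinarith
  omega

/-- How much person `i` has solved after `r` complete rounds. -/
def rowVal (n r i : Int) : Int := r * (i + 1) + n * S (r - 1)

/-- The solved list during round `r`, persons `< a` already served this round. -/
def mixRow (n r a : Int) : List Int :=
  (List.range n.toNat).map (fun (k : Nat) =>
    if (k : Int) < a then rowVal n (r + 1) (k : Int) else rowVal n r (k : Int))

/-- The final solved list, in terms of the terminating step `T`. -/
def finalL (n p T : Int) : List Int :=
  (List.range n.toNat).map (fun (k : Nat) =>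
    (if (k : Int) < (T - 1) % n then rowVal n ((T - 1) / n + 1) (k : Int)
     else rowVal n ((T - 1) / n) (k : Int))
    + (if (k : Int) = (T - 1) % n then p - S (T - 1) else 0))

lemma rowVal_step (n r i : Int) : rowVal n r i + (r * n + i + 1) = rowVal n (r + 1) i := by
  unfold rowVal
  have hS := S_succ (r - 1)
  rw [show r - 1 + 1 = r from by ring] at hS
  rw [show r + 1 - 1 = r from by ring, hS]
  ring

lemma set_map_range {N : Nat} (f : Nat → Int) (a : Nat) (v : Int) (ha : a < N) :
    ((List.range N).map f).set a v = (List.range N).map (fun k => if a = k then v else f k) := by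
  apply List.ext_getElem
  · simp
  · intro i h1 h2
    simp only [List.getElem_set, List.getElem_map, List.getElem_range]

lemma getD_mixRow (n r a : Int) (h0 : 0 ≤ a) (h1 : a < n) :
    PySem.List.pyGetD (mixRow n r a) a 0 = rowVal n r a := by
  rw [PySem.List.pyGetD_of_nonneg _ _ h0]
  unfold mixRow
  rw [PySem.List.getD_map_range _ _ _ _ (by omega : a.toNat < n.toNat)]
  rw [if_neg (by omega : ¬ ((a.toNat : Int) < a)), show ((a.toNat : Int)) = a from by omega]

lemma mixRow_set (n r a : Int) (h0 : 0 ≤ a) (h1 : a < n) :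
    (mixRow n r a).set a.toNat (rowVal n (r + 1) a) = mixRow n r (a + 1) := by
  unfold mixRow
  rw [set_map_range _ _ _ (by omega : a.toNat < n.toNat)]
  apply List.map_congr_left
  intro k hk
  simp only [List.mem_range] at hk
  by_cases hka : a.toNat = k
  · rw [if_pos hka, if_pos (by omega : (k : Int) < a + 1), show ((k : Int)) = a from by omega]
  · rw [if_neg hka]
    by_cases hk2 : (k : Int) < a
    · rw [if_pos hk2, if_pos (by omega : (k : Int) < a + 1)]
    · rw [if_neg hk2, if_neg (by omega : ¬ ((k : Int) < a + 1))]

lemma ediv_emod_of_decomp {x r a n : Int} (hn : 0 < n) (hr : 0 ≤ r) (h0 : 0 ≤ a) (h1 : a < n)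
    (hx : x = r * n + a) : x / n = r ∧ x % n = a := by
  have hq : x / n = r := by
    rw [hx, show r * n + a = a + r * n from by ring,
      Int.add_mul_ediv_right a r (by omega : n ≠ 0), Int.ediv_eq_zero_of_lt h0 h1]
    ring
  refine ⟨hq, ?_⟩
  have h3 := Int.ediv_add_emod x n
  rw [hq] at h3
  have h4 : n * r = r * n := by ring
  omega

lemma mixRow_set_final (n p r a T : Int) (hn : 0 < n) (hr : 0 ≤ r) (h0 : 0 ≤ a) (h1 : a < n)
    (hT : T = r * n + a + 1) :
    (mixRow n r a).set a.toNat (rowVal n r a + (p - S (r * n + a))) = finalL n p T := by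
  obtain ⟨hq, hj⟩ := ediv_emod_of_decomp hn hr h0 h1 (show T - 1 = r * n + a from by omega)
  unfold mixRow finalL
  rw [hq, hj, set_map_range _ _ _ (by omega : a.toNat < n.toNat)]
  apply List.map_congr_left
  intro k hk
  simp only [List.mem_range] at hk
  by_cases hka : a.toNat = k
  · rw [if_pos hka, if_neg (by omega : ¬ ((k : Int) < a)), if_pos (by omega : ((k : Int)) = a),
      show ((k : Int)) = a from by omega, show T - 1 = r * n + a from by omega]
  · rw [if_neg hka, if_neg (by omega : ¬ ((k : Int) = a)), add_zero]

lemma inner_spec (n p r T : Int) (hn : 0 < n) (hr : 0 ≤ r) (hT : charT p T) :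
    ∀ (d : Nat) (a : Int), 0 ≤ a → a ≤ n → (n - a).toNat = d → r * n + a < T →
    innerA n r (PySem.List.pyRange a n 1) (mixRow n r a, p - S (r * n + a)) =
      if T ≤ (r + 1) * n then (finalL n p T, 0)
      else (mixRow n r n, p - S ((r + 1) * n)) := by
  intro d
  induction d with
  | zero =>
      intro a h0 h1 hd hlt
      have ha : a = n := by omega
      subst ha
      rw [PySem.List.pyRange_one_eq_nil (le_refl a)]
      have hra : (r + 1) * a = r * a + a := by ring
      rw [if_neg (show ¬ (T ≤ (r + 1) * a) by omega),
        show (r + 1) * a = r * a + a from by ring]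
      rfl
  | succ f ih =>
      intro a h0 h1 hd hlt
      have ha : a < n := by omega
      rw [PySem.List.pyRange_one_cons ha]
      have hrn : 0 ≤ r * n := mul_nonneg hr (le_of_lt hn)
      have hScond : p ≤ S (r * n + a + 1) ↔ T ≤ r * n + a + 1 :=
        le_S_iff hT (by omega)
      have hSs : S (r * n + a + 1) = S (r * n + a) + (r * n + a + 1) := S_succ (r * n + a)
      simp only [innerA]
      by_cases hbr : p - S (r * n + a) ≤ r * n + (a + 1)
      · -- break: T = r * n + a + 1
        have hTeq : T = r * n + a + 1 := by
          have : T ≤ r * n + a + 1 := hScond.mp (by omega)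
          omega
        have hrn1 : (r + 1) * n = r * n + n := by ring
        rw [if_pos hbr, getD_mixRow n r a h0 ha,
          PySem.List.pySetD_of_nonneg _ _ h0,
          mixRow_set_final n p r a T hn hr h0 ha hTeq,
          if_pos (show T ≤ (r + 1) * n by omega)]
      · -- no break
        have hTgt : r * n + (a + 1) < T := by
          by_contra hc
          exact hbr (by omega : p - S (r * n + a) ≤ r * n + (a + 1))
        rw [if_neg hbr, getD_mixRow n r a h0 ha, PySem.List.pySetD_of_nonneg _ _ h0,
          show r * n + (a + 1) = r * n + a + 1 from by ring, rowVal_step n r a,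
          mixRow_set n r a h0 ha,
          show p - S (r * n + a) - (r * n + a + 1) = p - S (r * n + (a + 1)) from by
            rw [show r * n + (a + 1) = r * n + a + 1 from by ring]; omega]
        exact ih (a + 1) (by omega) (by omega) (by omega) (by omega)
  

lemma outerA_stop (n : Int) (fuel : Nat) (xs : List Int) (r : Int) :
    outerA n fuel xs 0 r = (xs, 0) := by
  cases fuel <;> simp [outerA]

lemma mixRow_full (n r : Int) : mixRow n r n = mixRow n (r + 1) 0 := by
  unfold mixRow
  apply List.map_congr_left
  intro k hk
  simp only [List.mem_range] at hk
  rw [if_pos (by omega : (k : Int) < n), if_neg (by omega : ¬ ((k : Int) < 0))]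

lemma outer_spec (n p T : Int) (hn : 0 < n) (hT : charT p T) :
    ∀ (fuel : Nat) (r : Int), 0 ≤ r → r * n < T → (p - S (r * n)).toNat ≤ fuel →
    outerA n fuel (mixRow n r 0) (p - S (r * n)) r = (finalL n p T, 0) := by
  intro fuel
  induction fuel with
  | zero =>
      intro r hr hrT hfuel
      exfalso
      have hrn : 0 ≤ r * n := mul_nonneg hr (le_of_lt hn)
      have hS1 : S (r * n) ≤ S (T - 1) := S_mono hrn (by omega)
      have := hT.2.1
      omega
  | succ f ih =>
      intro r hr hrT hfuel
      have hrn : 0 ≤ r * n := mul_nonneg hr (le_of_lt hn)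
      have hS1 : S (r * n) ≤ S (T - 1) := S_mono hrn (by omega)
      have hpos : 0 < p - S (r * n) := by have := hT.2.1; omega
      have hin := inner_spec n p r T hn hr hT n.toNat 0 (le_refl 0) (le_of_lt hn)
        (by omega) (by omega)
      simp only [add_zero] at hin
      simp only [outerA, if_pos hpos, hin]
      by_cases hc : T ≤ (r + 1) * n
      · rw [if_pos hc]
        exact outerA_stop n f (finalL n p T) (r + 1)
      · rw [if_neg hc]
        have hstep : S (r * n) + n ≤ S ((r + 1) * n) := by
          rw [show (r + 1) * n = r * n + n from by ring]
          exact S_add_ge hrn (le_of_lt hn)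
        rw [show mixRow n r n = mixRow n (r + 1) 0 from mixRow_full n r]
        exact ih (r + 1) (by omega) (by omega) (by omega)

lemma bsearch_spec (p : Int) :
    ∀ (fuel : Nat) (lo hi : Int), 1 ≤ lo → lo ≤ hi → S (lo - 1) < p → p ≤ S hi →
    (hi - lo).toNat ≤ fuel → charT p (bsearchB p fuel lo hi) := by
  intro fuel
  induction fuel with
  | zero =>
      intro lo hi h1 h2 h3 h4 h5
      have : lo = hi := by omega
      subst this
      exact ⟨h1, h3, h4⟩
  | succ f ih =>
      intro lo hi h1 h2 h3 h4 h5
      by_cases hlt : lo < hi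
      · have hmid := PySem.Int.floordiv_two_mid_bounds (le_of_lt hlt)
        have hmlt : PySem.Int.floordiv (lo + hi) 2 < hi := by
          rw [PySem.Int.floordiv_lt_iff_lt_mul (by omega)]; omega
        have hSm : PySem.Int.floordiv (PySem.Int.floordiv (lo + hi) 2 * (PySem.Int.floordiv (lo + hi) 2 + 1)) 2
            = S (PySem.Int.floordiv (lo + hi) 2) := by
          rw [PySem.Int.floordiv_eq_ediv_of_pos (by omega : (0:Int) < 2)]; rfl
        simp only [bsearchB, if_pos hlt, hSm]
        by_cases hc : p ≤ S (PySem.Int.floordiv (lo + hi) 2)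
        · rw [if_pos hc]
          exact ih lo _ h1 hmid.1 h3 hc (by omega)
        · rw [if_neg hc]
          refine ih _ hi (by omega) (by omega) ?_ h4 (by omega)
          rw [show PySem.Int.floordiv (lo + hi) 2 + 1 - 1 = PySem.Int.floordiv (lo + hi) 2 from by ring]
          omega
      · have : lo = hi := by omega
        subst this
        simp only [bsearchB, if_neg hlt]
        exact ⟨h1, h3, h4⟩

lemma bsearch_charT (p : Int) (hp : 0 < p) : charT p (bsearchB p p.toNat 1 p) := by
  apply bsearch_spec p p.toNat 1 p (by omega) (by omega)
  · simpa [S] using hp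
  · have := two_S p; nlinarith
  · omega

-- the shared `max` / `.index` tail of both Pythons, as a proof-side function
def answer (xs : List Int) : List Int :=
  match PySem.List.max? xs (fun x => x) with
  | none => []
  | some m =>
      match PySem.List.index? xs m with
      | none => []
      | some idx => [(idx : Int) + 1, m]

lemma A_list (n p T : Int) (hn : 0 < n) (hT : charT p T) :
    (outerA n (p.toNat + 1) (PySem.List.pyRepeat [(0 : Int)] n) p 0).1 = finalL n p T := by
  have hp := charT_p_pos hT
  have hS0 : S 0 = 0 := by decide
  have hrepl : mixRow n 0 0 = List.replicate n.toNat 0 := by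
    unfold mixRow
    rw [List.eq_replicate_iff]
    refine ⟨by simp, ?_⟩
    intro b hb
    simp only [List.mem_map, List.mem_range] at hb
    obtain ⟨k, hk, hkb⟩ := hb
    rw [if_neg (by omega : ¬ ((k : Int) < 0))] at hkb
    rw [← hkb]
    unfold rowVal S
    norm_num
  have h0 := outer_spec n p T hn hT (p.toNat + 1) 0 le_rfl
    (by rw [zero_mul]; have := hT.1; omega)
    (by rw [zero_mul, hS0]; omega)
  rw [zero_mul, hS0, sub_zero] at h0
  rw [PySem.List.pyRepeat_singleton, ← hrepl, h0]

lemma pvTotal_eq (n p T i : Int) (hn : 0 < n) (hT : charT p T) (h0 : 0 ≤ i) (h1 : i < n) :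
    pvTotal n T (p - S (T - 1)) ((T - 1) % n) i =
      (if i < (T - 1) % n then rowVal n ((T - 1) / n + 1) i else rowVal n ((T - 1) / n) i)
      + (if i = (T - 1) % n then p - S (T - 1) else 0) := by
  have hT1 : 1 ≤ T := hT.1
  have hj0 : 0 ≤ (T - 1) % n := Int.emod_nonneg _ (by omega)
  have hj1 : (T - 1) % n < n := Int.emod_lt_of_pos _ hn
  have hq0 : 0 ≤ (T - 1) / n := Int.ediv_nonneg (by omega) (by omega)
  have hdec : T - 1 = n * ((T - 1) / n) + (T - 1) % n := (Int.ediv_add_emod _ _).symm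
  set q := (T - 1) / n with hqdef
  set j := (T - 1) % n with hjdef
  have hnq : n * q = q * n := by ring
  -- the count of complete steps of person i
  have hm : (if i + 2 ≤ T then PySem.Int.floordiv (T - i - 2) n + 1 else 0)
      = if i < j then q + 1 else q := by
    by_cases hij : i < j
    · have hqn : 0 ≤ q * n := mul_nonneg hq0 (by omega)
      rw [if_pos hij, if_pos (by omega : i + 2 ≤ T),
        PySem.Int.floordiv_eq_ediv_of_pos hn,
        show T - i - 2 = (j - i - 1) + q * n from by omega,
        Int.add_mul_ediv_right _ _ (by omega : n ≠ 0),
        Int.ediv_eq_zero_of_lt (by omega) (by omega)]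
      ring
    · rw [if_neg hij]
      by_cases hq1 : 1 ≤ q
      · have hqn : n ≤ q * n := le_mul_of_one_le_left (le_of_lt hn) hq1
        rw [if_pos (by omega : i + 2 ≤ T),
          PySem.Int.floordiv_eq_ediv_of_pos hn,
          show T - i - 2 = (n + j - i - 1) + (q - 1) * n from by
            have : (q - 1) * n = q * n - n := by ring
            omega,
          Int.add_mul_ediv_right _ _ (by omega : n ≠ 0),
          Int.ediv_eq_zero_of_lt (by omega) (by omega)]
        omega
      · have hq' : q = 0 := by omega
        have hdec0 : T - 1 = j := by rw [hq'] at hdec; omega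
        rw [if_neg (by omega : ¬ (i + 2 ≤ T)), hq']
  -- the series total is rowVal
  have hrow : ∀ m : Int, m * (i + 1) + PySem.Int.floordiv (n * m * (m - 1)) 2 = rowVal n m i := by
    intro m
    have heven : (2 : Int) ∣ (m - 1) * m := by
      have h := (Int.even_mul_succ_self (m - 1)).two_dvd
      rwa [show m - 1 + 1 = m from by ring] at h
    rw [PySem.Int.floordiv_eq_ediv_of_pos (by omega : (0:Int) < 2),
      show n * m * (m - 1) = n * ((m - 1) * m) from by ring,
      Int.mul_ediv_assoc n heven]
    unfold rowVal S
    rw [show m - 1 + 1 = m from by ring]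
  unfold pvTotal
  simp only [hm]
  by_cases hij : i < j
  · rw [if_pos hij, if_neg (by omega : ¬ i = j), if_pos hij, if_neg (by omega : ¬ i = j),
      hrow (q + 1), add_zero]
  · rw [if_neg hij, if_neg hij]
    by_cases hieq : i = j
    · rw [if_pos hieq, if_pos hieq, hrow q]
    · rw [if_neg hieq, if_neg hieq, hrow q, add_zero]

lemma B_list (n p T : Int) (hn : 0 < n) (hT : charT p T) :
    ((PySem.List.pyRange 0 n 1).map (fun i => pvTotal n T (p - S (T - 1)) ((T - 1) % n) i))
      = finalL n p T := by
  rw [PySem.List.pyRange_zero, List.map_map]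
  unfold finalL
  apply List.map_congr_left
  intro k hk
  simp only [List.mem_range] at hk
  simp only [Function.comp_apply]
  exact pvTotal_eq n p T (k : Int) hn hT (by omega) (by omega)


-- B's totals list, exactly as the port computes it
def Btotals (n p : Int) : List Int :=
  if p ≤ 0 then PySem.List.pyRepeat [(0 : Int)] n
  else
    let t := bsearchB p p.toNat 1 p
    let rem := p - PySem.Int.floordiv (t * (t - 1)) 2
    let j := PySem.Int.mod (t - 1) n
    let c := min n (t - 1)
    let totals0 := (PySem.List.pyRange 0 c 1).map (fun i => pvTotal n t rem j i)
        ++ PySem.List.pyRepeat [(0 : Int)] (n - c)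
    if c ≤ j then PySem.List.pySetD totals0 j rem else totals0

lemma pvTotal_tail (n T rem j i : Int) (hiT : ¬ i + 2 ≤ T) :
    pvTotal n T rem j i = if i = j then rem else 0 := by
  have h0 : PySem.Int.floordiv (n * 0 * (0 - 1)) 2 = 0 := by
    rw [PySem.Int.floordiv_eq_ediv_of_pos (by omega : (0:Int) < 2)]
    norm_num
  simp only [pvTotal, if_neg hiT, h0, zero_mul, add_zero, zero_add]

lemma concat_zeros_length (f : Int → Int) (c m : Int) :
    ((PySem.List.pyRange 0 c 1).map f ++ PySem.List.pyRepeat [(0:Int)] m).length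
      = (c - 0).toNat + m.toNat := by
  rw [List.length_append, List.length_map, PySem.List.pyRepeat_singleton,
    PySem.List.length_pyRange_one, List.length_replicate]

lemma getElem_concat_zeros (f : Int → Int) (c m : Int) (k : Nat) (hc : 0 ≤ c)
    (hk : k < ((PySem.List.pyRange 0 c 1).map f ++ PySem.List.pyRepeat [(0:Int)] m).length) :
    ((PySem.List.pyRange 0 c 1).map f ++ PySem.List.pyRepeat [(0:Int)] m)[k]
      = if k < c.toNat then f (k : Int) else 0 := by
  rw [List.getElem_append]
  by_cases hkc : k < c.toNat
  · rw [dif_pos (by rw [List.length_map, PySem.List.length_pyRange_one]; omega)]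
    rw [if_pos hkc, List.getElem_map, PySem.List.getElem_pyRange_one]
    norm_num
  · rw [dif_neg (by rw [List.length_map, PySem.List.length_pyRange_one]; omega)]
    rw [if_neg hkc]
    have hrep : PySem.List.pyRepeat [(0:Int)] m = List.replicate m.toNat 0 :=
      PySem.List.pyRepeat_singleton 0 m
    simp only [hrep, List.getElem_replicate]

lemma B_concat (n p T : Int) (hn : 0 < n) (hT : charT p T) :
    (if min n (T - 1) ≤ (T - 1) % n then
      PySem.List.pySetD
        ((PySem.List.pyRange 0 (min n (T - 1)) 1).map
            (fun i => pvTotal n T (p - S (T - 1)) ((T - 1) % n) i)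
          ++ PySem.List.pyRepeat [(0:Int)] (n - min n (T - 1)))
        ((T - 1) % n) (p - S (T - 1))
     else
      (PySem.List.pyRange 0 (min n (T - 1)) 1).map
            (fun i => pvTotal n T (p - S (T - 1)) ((T - 1) % n) i)
          ++ PySem.List.pyRepeat [(0:Int)] (n - min n (T - 1)))
    = (PySem.List.pyRange 0 n 1).map (fun i => pvTotal n T (p - S (T - 1)) ((T - 1) % n) i) := by
  have hT1 : 1 ≤ T := hT.1
  have hj0 : 0 ≤ (T - 1) % n := Int.emod_nonneg _ (by omega)
  have hj1 : (T - 1) % n < n := Int.emod_lt_of_pos _ hn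
  set j := (T - 1) % n with hjdef
  set rem := p - S (T - 1) with hremdef
  set c := min n (T - 1) with hcdef
  have hc0 : 0 ≤ c := by omega
  have hcn : c ≤ n := by omega
  have htail : ∀ (k : Nat), c.toNat ≤ k → k < n.toNat →
      pvTotal n T rem j (k : Int) = if (k : Int) = j then rem else 0 := by
    intro k hck hkn
    have hcltn : c < n := by omega
    exact pvTotal_tail n T rem j (k : Int) (by omega)
  apply List.ext_getElem
  · rw [List.length_map, PySem.List.length_pyRange_one]
    by_cases hcj : c ≤ j
    · rw [if_pos hcj, PySem.List.pySetD_of_nonneg _ _ hj0, List.length_set,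
        concat_zeros_length (fun i => pvTotal n T rem j i) c (n - c)]
      omega
    · rw [if_neg hcj, concat_zeros_length (fun i => pvTotal n T rem j i) c (n - c)]
      omega
  · intro k h1 h2
    have hkn : k < n.toNat := by
      simp only [List.length_map, PySem.List.length_pyRange_one] at h2; omega
    have hR : (List.map (fun i => pvTotal n T rem j i) (PySem.List.pyRange 0 n 1))[k]'h2
        = pvTotal n T rem j (k : Int) := by
      rw [List.getElem_map, PySem.List.getElem_pyRange_one]
      norm_num
    rw [hR]
    by_cases hcj : c ≤ j
    · rw [List.getElem_of_eq (if_pos hcj)]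
      rw [List.getElem_of_eq (PySem.List.pySetD_of_nonneg _ _ hj0), List.getElem_set]
      by_cases hjk : j.toNat = k
      · rw [if_pos hjk]
        have hkj : (k : Int) = j := by omega
        rw [htail k (by omega) hkn, if_pos hkj]
      · rw [if_neg hjk, getElem_concat_zeros (fun i => pvTotal n T rem j i) c (n - c) k hc0 _]
        by_cases hkc : k < c.toNat
        · rw [if_pos hkc]
        · rw [if_neg hkc, htail k (by omega) hkn, if_neg (by omega : ¬ ((k : Int) = j))]
    · rw [List.getElem_of_eq (if_neg hcj),
        getElem_concat_zeros (fun i => pvTotal n T rem j i) c (n - c) k hc0 _]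
      by_cases hkc : k < c.toNat
      · rw [if_pos hkc]
      · rw [if_neg hkc, htail k (by omega) hkn, if_neg (by omega : ¬ ((k : Int) = j))]

lemma lists_eq (n p : Int) (hn : 0 < n) :
    (outerA n (p.toNat + 1) (PySem.List.pyRepeat [(0 : Int)] n) p 0).1 = Btotals n p := by
  by_cases hp : p ≤ 0
  · -- no problems: both lists are [0]*n
    have hfuel : p.toNat + 1 = 0 + 1 := by omega
    rw [hfuel]
    simp only [outerA, if_neg (by omega : ¬ (0 : Int) < p)]
    unfold Btotals
    rw [if_pos hp]
  · -- p ≥ 1: both lists equal finalL n p T for the terminating step T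
    have hT := bsearch_charT p (by omega)
    set T := bsearchB p p.toNat 1 p with hTdef
    have hj : PySem.Int.mod (T - 1) n = (T - 1) % n := PySem.Int.mod_eq_emod_of_pos hn
    have hrem : p - PySem.Int.floordiv (T * (T - 1)) 2 = p - S (T - 1) := by
      rw [PySem.Int.floordiv_eq_ediv_of_pos (by omega : (0:Int) < 2),
        show T * (T - 1) = (T - 1) * (T - 1 + 1) from by ring]
      rfl
    rw [A_list n p T hn hT]
    unfold Btotals
    simp only [if_neg hp]
    rw [← hTdef]
    simp only [hj, hrem]
    rw [B_concat n p T hn hT]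
    exact (B_list n p T hn hT).symm

-- ===== VERDICT (by name: the statement is the Claim_ definition above) =====
theorem solve_genius_problem_spec : Claim_equal_solve_genius_problem := by
  intro n p hDom hPre
  unfold Spec_solve_genius_problem
  have hn : (0 : Int) < n := by
    unfold Pre_solve_genius_problem at hPre
    omega
  calc solve_genius_problem n p
      = answer (outerA n (p.toNat + 1) (PySem.List.pyRepeat [(0 : Int)] n) p 0).1 := rfl
    _ = answer (Btotals n p) := by rw [lists_eq n p hn]
    _ = solve_genius_problem_alt n p := rfl
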